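-- pv_equiv track=rewrite | github.com/adiens916/NOTE-algorithm | problems/Baekjoon_Online_Judge/Step_by_step/21_Queue_and_Deque/2164_카드2.py | pick_from_queue
-- ===== SOURCE A (Python) =====
-- from collections import deque
--
-- def pick_from_queue(N: int):
--     nums = [i for i in range(1, N + 1)]
--     queue = deque(nums)
--     pick = -1
--
--     while queue:
--         pick = queue.popleft()
--         if queue:
--             queue.append(queue.popleft())
--
--     return pick
-- ===== SOURCE B (Python) =====
-- def pick_from_queue(N: int):
--     # Closed form for the step-2 elimination queue: O(1) instead of O(N).
--     if N < 1:
--         return -1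
--     p = 1 << (N.bit_length() - 1)  # largest power of two <= N
--     return N if p == N else 2 * (N - p)
-- ===== Notes on version B (the rewrite author's own statement) =====
-- stated objective: faster
-- what changed: Replaced the linear-time deque simulation with the constant-time Josephus closed form: twice the distance from the largest power of two not exceeding N (N itself when N is a power of two), computed via bit_length.
import Mathlib
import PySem

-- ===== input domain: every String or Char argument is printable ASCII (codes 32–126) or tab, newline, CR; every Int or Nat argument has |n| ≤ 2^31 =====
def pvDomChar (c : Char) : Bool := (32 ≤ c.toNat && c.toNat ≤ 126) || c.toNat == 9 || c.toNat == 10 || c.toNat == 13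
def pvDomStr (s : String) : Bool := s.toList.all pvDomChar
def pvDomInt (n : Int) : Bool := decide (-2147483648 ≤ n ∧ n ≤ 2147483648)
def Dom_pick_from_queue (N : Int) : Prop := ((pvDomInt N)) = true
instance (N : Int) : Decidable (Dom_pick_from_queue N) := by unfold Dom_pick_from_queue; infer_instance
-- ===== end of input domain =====

-- B replaces A's O(N) deque simulation with the O(1) Josephus closed form 2*(N - 2^⌊log2 N⌋) (N when N is a power of two).

-- ===== PORT A =====
-- deque as the standard two-list queue: popleft refills the front from the reversed back
def pvPop : List Int → List Int → Option (Int × List Int × List Int)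
  | [], back =>
    match back.reverse with
    | [] => none
    | x :: f => some (x, f, [])
  | x :: f, back => some (x, f, back)

-- the while loop: pick = popleft(); if queue: append(popleft());
-- fuel = number of remaining iterations (= queue length), only to make the recursion structural
def pvLoopA : Nat → List Int → List Int → Int → Int
  | 0, _, _, pick => pick
  | fuel + 1, front, back, pick =>
    match pvPop front back with
    | none => pick
    | some (x, f, b) =>
      match pvPop f b with
      | none => x
      | some (y, f2, b2) => pvLoopA fuel f2 (y :: b2) x

def pick_from_queue (N : Int) : Int :=
  pvLoopA (PySem.List.pyRange 1 (N + 1) 1).length (PySem.List.pyRange 1 (N + 1) 1) [] (-1)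

-- ===== PORT B =====
def pick_from_queue_alt (N : Int) : Int :=
  if N < 1 then -1
  else
    -- p = 1 << (N.bit_length() - 1), the largest power of two ≤ N
    if ((2 ^ Nat.log 2 N.toNat : Nat) : Int) = N then N
    else 2 * (N - ((2 ^ Nat.log 2 N.toNat : Nat) : Int))

-- ===== PRECONDITION & SPEC =====
def Spec_pick_from_queue (N : Int) (out : Int) : Prop := out = pick_from_queue_alt N
instance (N : Int) (out : Int) : Decidable (Spec_pick_from_queue N out) := by unfold Spec_pick_from_queue; infer_instance

-- ===== CLAIM (what is proved, stated in full; the proofs are below) =====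
def Claim_equal_pick_from_queue : Prop := ∀ (N : Int), Dom_pick_from_queue N → Spec_pick_from_queue N (pick_from_queue N)

-- ===== LEMMAS AND PROOFS =====

-- proof-side model of the loop: the queue as one list
def pvSim : List Int → Int → Int
  | [], pick => pick
  | [x], _ => x
  | x :: y :: rs, _ => pvSim (rs ++ [y]) x
termination_by l _ => l.length
decreasing_by simp

theorem pvSim_irrel (l : List Int) (p q : Int) (h : l ≠ []) :
    pvSim l p = pvSim l q := by
  match l with
  | [x] => simp [pvSim]
  | x :: y :: rs => simp [pvSim]

theorem pvSim_step (x y : Int) (l : List Int) (p : Int) :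
    pvSim (x :: y :: l) p = pvSim (l ++ [y]) x := by
  simp [pvSim]

theorem pvPop_spec (f b : List Int) :
    (pvPop f b = none → f ++ b.reverse = []) ∧
    (∀ x f' b', pvPop f b = some (x, f', b') →
      f ++ b.reverse = x :: (f' ++ b'.reverse) ∧
      f'.length + b'.length + 1 = f.length + b.length) := by
  match f with
  | [] =>
    cases hb : b.reverse with
    | nil =>
      constructor
      · intro _; rfl
      · intro x f' b' h; simp [pvPop, hb] at h
    | cons x f1 =>
      constructor
      · intro h; simp [pvPop, hb] at h
      · intro x' f' b' h
        simp only [pvPop, hb] at h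
        obtain ⟨rfl, rfl, rfl⟩ := h
        refine ⟨by simp, ?_⟩
        have : b.reverse.length = b.length := by simp
        rw [hb] at this
        simp at this ⊢
        omega
  | z :: f1 =>
    constructor
    · intro h; simp [pvPop] at h
    · intro x f' b' h
      simp only [pvPop, Option.some.injEq] at h
      obtain ⟨rfl, rfl, rfl⟩ := h
      simp
      omega

-- bridge: the two-list queue computes the single-list model
theorem pvLoopA_eq_sim : ∀ (fuel : Nat) (f b : List Int) (p : Int),
    f.length + b.length ≤ fuel → pvLoopA fuel f b p = pvSim (f ++ b.reverse) p := by
  intro fuel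
  induction fuel with
  | zero =>
    intro f b p hf
    have hf0 : f = [] := by cases f <;> simp_all
    have hb0 : b = [] := by cases b <;> simp_all
    subst hf0; subst hb0
    simp [pvLoopA, pvSim]
  | succ n ih =>
    intro f b p hf
    obtain ⟨h1, h2⟩ := pvPop_spec f b
    cases hp : pvPop f b with
    | none =>
      rw [h1 hp]
      simp [pvLoopA, hp, pvSim]
    | some v =>
      obtain ⟨x, f1, b1⟩ := v
      obtain ⟨he, hl⟩ := h2 x f1 b1 hp
      obtain ⟨g1, g2⟩ := pvPop_spec f1 b1
      cases hp2 : pvPop f1 b1 with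
      | none =>
        rw [he, g1 hp2]
        simp [pvLoopA, hp, hp2, pvSim]
      | some w =>
        obtain ⟨y, f2, b2⟩ := w
        obtain ⟨he2, hl2⟩ := g2 y f2 b2 hp2
        rw [he, he2]
        simp only [pvLoopA, hp, hp2]
        rw [pvSim_step, ih f2 (y :: b2) x (by simp; omega)]
        congr 1
        simp [List.append_assoc]


-- the list [1, 2, ..., n]
def pvRng (n : Nat) : List Int := (List.range n).map (fun (k : Nat) => (1 : Int) + (k : Int))

-- elements at even (1-based) positions
def pvEvens : List Int → List Int
  | _ :: y :: rs => y :: pvEvens rs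
  | _ => []

-- the closed form, on Nat
def pvC (n : Nat) : Nat :=
  if 2 ^ Nat.log 2 n = n then n else 2 * (n - 2 ^ Nat.log 2 n)

-- one full pass: even-length prefix A still to process, already-moved suffix B
theorem pvPass_aux : ∀ (fuel : Nat) (A B : List Int), A.length ≤ fuel →
    A.length % 2 = 0 → (A ≠ [] ∨ B ≠ []) → ∀ p q,
    pvSim (A ++ B) p = pvSim (B ++ pvEvens A) q := by
  intro fuel
  induction fuel with
  | zero =>
    intro A B hf h2 hne p q
    have : A = [] := List.eq_nil_of_length_eq_zero (Nat.le_zero.mp hf)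
    subst this
    simp only [List.nil_append, pvEvens, List.append_nil]
    exact pvSim_irrel _ _ _ (hne.resolve_left (by simp))
  | succ n ih =>
    intro A B hf h2 hne p q
    match A with
    | [] =>
      simp only [List.nil_append, pvEvens, List.append_nil]
      exact pvSim_irrel _ _ _ (hne.resolve_left (by simp))
    | [x] => simp at h2
    | x :: y :: A' =>
      have h1 : pvSim ((x :: y :: A') ++ B) p = pvSim ((A' ++ B) ++ [y]) x := by
        simpa using pvSim_step x y (A' ++ B) p
      rw [h1, List.append_assoc]
      have h3 : A'.length ≤ n := by simp at hf; omega
      have h4 : A'.length % 2 = 0 := by simp at h2 ⊢; omega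
      rw [ih A' (B ++ [y]) h3 h4 (Or.inr (by simp)) x q]
      simp [pvEvens]

-- pvSim commutes with any map (it only selects/permutes elements)
theorem pvSim_map_aux (f : Int → Int) : ∀ (fuel : Nat) (l : List Int),
    l.length ≤ fuel → l ≠ [] → ∀ p q,
    pvSim (l.map f) p = f (pvSim l q) := by
  intro fuel
  induction fuel with
  | zero =>
    intro l hf hne
    exact absurd (List.eq_nil_of_length_eq_zero (Nat.le_zero.mp hf)) hne
  | succ n ih =>
    intro l hf hne p q
    match l with
    | [x] => simp [pvSim]
    | x :: y :: rs =>
      rw [List.map_cons, List.map_cons, pvSim_step, pvSim_step,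
          show List.map f rs ++ [f y] = List.map f (rs ++ [y]) by simp]
      exact ih (rs ++ [y]) (by simp at hf ⊢; omega) (by simp) (f x) x

theorem pvRng_succ (n : Nat) : pvRng (n + 1) = pvRng n ++ [(1 : Int) + (n : Int)] := by
  simp [pvRng, List.range_succ]

theorem pvRng_cons (n : Nat) :
    pvRng (n + 1) = 1 :: (pvRng n).map (fun i => i + 1) := by
  simp only [pvRng, List.range_succ_eq_map, List.map_cons, List.map_map]
  congr 1

theorem pvEvens_append_two : ∀ (fuel : Nat) (A : List Int) (a b : Int),
    A.length ≤ fuel → A.length % 2 = 0 →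
    pvEvens (A ++ [a, b]) = pvEvens A ++ [b] := by
  intro fuel
  induction fuel with
  | zero =>
    intro A a b hf h2
    have : A = [] := List.eq_nil_of_length_eq_zero (Nat.le_zero.mp hf)
    subst this; rfl
  | succ n ih =>
    intro A a b hf h2
    match A with
    | [] => rfl
    | [x] => simp at h2
    | x :: y :: A' =>
      simp only [List.cons_append, pvEvens]
      rw [ih A' a b (by simp at hf; omega) (by simp at h2 ⊢; omega)]

theorem pvRng_len (n : Nat) : (pvRng n).length = n := by simp [pvRng]

theorem pvEvens_rng : ∀ (m : Nat),
    pvEvens (pvRng (2 * m)) = (pvRng m).map (fun i => 2 * i) := by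
  intro m
  induction m with
  | zero => rfl
  | succ k ih =>
    have h : 2 * (k + 1) = (2 * k) + 1 + 1 := by ring
    rw [h, pvRng_succ, pvRng_succ, List.append_assoc]
    rw [show [(1:Int) + ((2*k : Nat) : Int)] ++ [(1:Int) + (((2*k)+1 : Nat) : Int)] =
          [(1:Int) + ((2*k : Nat) : Int), (1:Int) + (((2*k)+1 : Nat) : Int)] from rfl]
    rw [pvEvens_append_two (2*k) _ _ _ (by rw [pvRng_len]) (by rw [pvRng_len]; omega), ih,
        pvRng_succ, List.map_append]
    simp only [List.map_cons, List.map_nil]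
    congr 2
    push_cast
    ring

theorem pvRng_ne_nil (n : Nat) (h : 1 ≤ n) : pvRng n ≠ [] := by
  intro hc
  have := pvRng_len n
  rw [hc] at this
  simp at this; omega

theorem pvMem_rng {i : Int} {n : Nat} (h : i ∈ pvRng n) : 1 ≤ i ∧ i ≤ n := by
  simp only [pvRng, List.mem_map, List.mem_range] at h
  obtain ⟨k, hk, rfl⟩ := h
  omega

-- log₂ arithmetic
theorem pvLog_even (m : Nat) (h : 1 ≤ m) : Nat.log 2 (2 * m) = Nat.log 2 m + 1 := by
  rw [mul_comm]
  exact Nat.log_mul_base (by norm_num) (by omega)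

theorem pvPow_le (m : Nat) (h : 1 ≤ m) : 2 ^ Nat.log 2 m ≤ m :=
  Nat.pow_log_le_self 2 (by omega)

theorem pvLt_pow (m : Nat) : m < 2 * 2 ^ Nat.log 2 m := by
  have := Nat.lt_pow_succ_log_self (b := 2) (by norm_num) m
  rw [pow_succ] at this; omega

theorem pvLog_odd (m : Nat) (h : 1 ≤ m) : Nat.log 2 (2 * m + 1) = Nat.log 2 m + 1 := by
  apply Nat.log_eq_of_pow_le_of_lt_pow
  · rw [pow_succ]
    have := pvPow_le m h; omega
  · rw [pow_succ, pow_succ]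
    have := pvLt_pow m; omega

theorem pvC_even (m : Nat) (h : 1 ≤ m) : pvC (2 * m) = 2 * pvC m := by
  have h1 := pvPow_le m h
  have h2 := pvLt_pow m
  unfold pvC
  rw [pvLog_even m h, pow_succ]
  by_cases hp : 2 ^ Nat.log 2 m = m
  · rw [if_pos (by omega), if_pos hp]
  · rw [if_neg (by omega), if_neg hp]
    omega

theorem pvC_odd (m : Nat) (h : 1 ≤ m) :
    pvC (2 * m + 1) = if pvC m = m then 2 else 2 * pvC m + 2 := by
  have h1 := pvPow_le m h
  have h2 := pvLt_pow m
  unfold pvC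
  rw [pvLog_odd m h, pow_succ]
  rw [if_neg (by omega)]
  by_cases hp : 2 ^ Nat.log 2 m = m
  · rw [if_pos (by rw [if_pos hp])]
    omega
  · rw [if_neg (by rw [if_neg hp]; omega)]
    rw [if_neg hp]
    omega

-- main invariant: the simulation on [1..n] computes the closed form
theorem pvMain : ∀ (n : Nat), 1 ≤ n → ∀ p, pvSim (pvRng n) p = (pvC n : Int) := by
  intro n
  induction n using Nat.strong_induction_on with
  | _ n ih =>
    intro hn p
    rcases Nat.even_or_odd n with ⟨m, hm⟩ | ⟨m, hm⟩
    · -- n = 2*m, m ≥ 1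
      have hm1 : 1 ≤ m := by omega
      have hn2 : n = 2 * m := by omega
      subst hn2
      have hpass := pvPass_aux (2 * m) (pvRng (2 * m)) [] (by rw [pvRng_len])
        (by rw [pvRng_len]; omega) (Or.inl (pvRng_ne_nil _ (by omega))) p p
      rw [List.append_nil] at hpass
      rw [hpass, List.nil_append, pvEvens_rng m]
      rw [pvSim_map_aux (fun i => 2 * i) m (pvRng m) (by rw [pvRng_len])
        (pvRng_ne_nil m hm1) p p]
      rw [ih m (by omega) hm1 p, pvC_even m hm1]
      push_cast
      ring
    · -- n = 2*m + 1
      rcases Nat.eq_zero_or_pos m with hm0 | hm1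
      · -- n = 1
        subst hm0
        have hn1 : n = 1 := by omega
        subst hn1
        have h1 : pvRng 1 = [1] := by simp [pvRng]
        have h2 : pvC 1 = 1 := by simp [pvC, Nat.log_one_right]
        rw [h1, h2]
        simp [pvSim]
      · have hn2 : n = 2 * m + 1 := by omega
        subst hn2
        rw [show 2 * m + 1 = (2 * m) + 1 from rfl, pvRng_succ]
        have hpass := pvPass_aux (2 * m) (pvRng (2 * m)) [(1 : Int) + ((2 * m : Nat) : Int)]
          (by rw [pvRng_len]) (by rw [pvRng_len]; omega) (Or.inr (by simp)) p p
        rw [hpass, pvEvens_rng m]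
        obtain ⟨k, hk⟩ : ∃ k, m = k + 1 := ⟨m - 1, by omega⟩
        subst hk
        rw [pvRng_cons k, List.map_cons, List.map_map, List.singleton_append, pvSim_step]
        set f : Int → Int := fun i => if i = ((k : Int) + 1) then 2 else 2 * i + 2 with hf
        have hlist : (pvRng k).map ((fun i => 2 * i) ∘ fun i => i + 1) ++ [2 * (1 : Int)] =
            (pvRng (k + 1)).map f := by
          rw [pvRng_succ, List.map_append]
          congr 1
          · apply List.map_congr_left
            intro a ha
            have := pvMem_rng ha
            simp only [Function.comp_apply, hf]
            rw [if_neg (by omega)]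
            ring
          · simp only [List.map_cons, List.map_nil, hf]
            rw [if_pos (by ring)]
            norm_num
        rw [hlist]
        rw [pvSim_map_aux f (k + 1) (pvRng (k + 1)) (by rw [pvRng_len])
          (pvRng_ne_nil _ (by omega)) _ p]
        rw [ih (k + 1) (by omega) (by omega) p]
        rw [pvC_odd (k + 1) (by omega)]
        simp only [hf]
        by_cases hc : pvC (k + 1) = k + 1
        · rw [if_pos (by exact_mod_cast congrArg (Nat.cast : Nat → Int) hc), if_pos hc]
          norm_num
        · rw [if_neg (by intro h; apply hc; exact_mod_cast h), if_neg hc]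
          push_cast
          ring

-- ===== VERDICT (by name: the statement is the Claim_ definition above) =====
theorem pick_from_queue_spec : Claim_equal_pick_from_queue := by
  intro N _
  unfold Spec_pick_from_queue pick_from_queue pick_from_queue_alt
  rw [pvLoopA_eq_sim _ _ _ _ (by simp), List.reverse_nil, List.append_nil]
  rw [PySem.List.pyRange_one]
  by_cases hN : N < 1
  · rw [if_pos hN]
    have h0 : (N + 1 - 1).toNat = 0 := by omega
    rw [h0]
    simp [pvSim]
  · rw [if_neg hN]
    have h1 : 1 ≤ N.toNat := by omega
    have h2 : (N + 1 - 1).toNat = N.toNat := by omega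
    rw [h2]
    have h3 : (List.range N.toNat).map (fun (k : Nat) => (1 : Int) + (k : Int)) = pvRng N.toNat := rfl
    rw [h3, pvMain N.toNat h1 (-1)]
    have hcast : ((N.toNat : Nat) : Int) = N := Int.toNat_of_nonneg (by omega)
    have hle := pvPow_le N.toNat h1
    unfold pvC
    by_cases hp : 2 ^ Nat.log 2 N.toNat = N.toNat
    · rw [if_pos hp, if_pos (by rw [hp, hcast]), hcast]
    · rw [if_neg hp, if_neg (by rw [← hcast]; exact_mod_cast hp)]
      omega
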